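-- pv_equiv track=rewrite | github.com/eshklyar/ScrapStuff | duplicate_encode.py | duplicate_encode1
-- ===== SOURCE A (Python) =====
-- def duplicate_encode1(word):
--     w = ""
--     for char in word:
--         if word.lower().count(char.lower()) > 1:
--             w += ")"
--         else:
--             w += "("
--     return w
-- ===== SOURCE B (Python) =====
-- def duplicate_encode1(word):
--     res = []
--     first = {}  # lowercased char -> index of its pending "(" ; -1 once patched
--     for i, ch in enumerate(word):
--         c = ch.lower()
--         if c not in first:
--             first[c] = i
--             res.append("(")
--         else:
--             j = first[c]
--             if j >= 0:
--                 res[j] = ")"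
--                 first[c] = -1
--             res.append(")")
--     return "".join(res)
-- ===== Notes on version B (the rewrite author's own statement) =====
-- stated objective: faster
-- what changed: B makes one streaming pass with enumerate, appending '(' on first sight of each lowercased character and, when a duplicate arrives, appending ')' and back-patching the recorded first-occurrence position, instead of A's full lower-and-count scan of the whole word for every character.
import Mathlib
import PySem

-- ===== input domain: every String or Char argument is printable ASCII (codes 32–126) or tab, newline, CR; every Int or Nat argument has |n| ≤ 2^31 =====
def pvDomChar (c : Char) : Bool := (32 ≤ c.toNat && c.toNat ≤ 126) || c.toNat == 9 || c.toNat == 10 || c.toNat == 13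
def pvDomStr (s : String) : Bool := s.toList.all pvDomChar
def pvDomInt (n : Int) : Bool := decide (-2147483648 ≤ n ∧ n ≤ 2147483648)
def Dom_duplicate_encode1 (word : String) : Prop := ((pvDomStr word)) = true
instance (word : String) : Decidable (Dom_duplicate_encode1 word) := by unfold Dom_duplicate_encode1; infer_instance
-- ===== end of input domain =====

-- B is a single streaming pass that back-patches the first occurrence when a duplicate appears,
-- instead of A's full-string count scan per character (objective: faster).

-- ===== PORT A =====
def duplicate_encode1 (word : String) : String :=
  word.toList.foldl
    (fun w char =>
      if PySem.Str.count (PySem.Str.lower word) (PySem.Str.lower (String.ofList [char])) > 1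
      then w ++ ")" else w ++ "(")
    ""

-- ===== PORT B =====
-- the loop body of Source B (one step of the streaming pass)
def dupB_step (st : List Char × PySem.Dict Char Int) (p : Int × Char) :
    List Char × PySem.Dict Char Int :=
  let c := PySem.Chars.lowerChar p.2
  match st.2.get? c with
  | none => (st.1 ++ ['('], st.2.insert c p.1)
  | some j =>
    if j ≥ 0 then (st.1.set j.toNat ')' ++ [')'], st.2.insert c (-1))
    else (st.1 ++ [')'], st.2)

def duplicate_encode1_alt (word : String) : String :=
  String.ofList
    (((PySem.List.enumerate word.toList 0).foldl dupB_step ([], PySem.Dict.empty)).1)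

-- ===== PRECONDITION & SPEC =====
def Spec_duplicate_encode1 (word : String) (out : String) : Prop := out = duplicate_encode1_alt word
instance (word : String) (out : String) : Decidable (Spec_duplicate_encode1 word out) := by unfold Spec_duplicate_encode1; infer_instance

-- ===== CLAIM (what is proved, stated in full; the proofs are below) =====
def Claim_equal_duplicate_encode1 : Prop := ∀ (word : String), Dom_duplicate_encode1 word → Spec_duplicate_encode1 word (duplicate_encode1 word)

-- ===== LEMMAS AND PROOFS =====

-- the encoding of l as seen against the (lowercased) context ctx
def encodeBy (ctx l : List Char) : List Char :=
  l.map (fun ch => if 2 ≤ ctx.count (PySem.Chars.lowerChar ch) then ')' else '(')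

-- what B's dict holds after processing prefix pre
def dictSpec (pre : List Char) (c : Char) : Option Int :=
  match PySem.List.index? (pre.map PySem.Chars.lowerChar) c with
  | none => none
  | some k =>
    if 2 ≤ (pre.map PySem.Chars.lowerChar).count c then some (-1) else some (k : Int)

theorem two_le_count_of_two_getElem (l : List Char) (c : Char) (k m : Nat)
    (hk : k < l.length) (hm : m < l.length) (hne : k ≠ m)
    (h1 : l[k] = c) (h2 : l[m] = c) : 2 ≤ l.count c := by
  have key : ∀ (i j : Nat) (hi : i < l.length) (hj : j < l.length),
      i < j → l[i] = c → l[j] = c → 2 ≤ l.count c := by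
    intro i j hi hj hij g1 g2
    have hsplit : l = l.take j ++ l.drop j := (List.take_append_drop j l).symm
    have hd : l.drop j = l[j] :: l.drop (j + 1) := List.drop_eq_getElem_cons hj
    have hmem : c ∈ l.take j := by
      have hlt : i < (l.take j).length := by simp; omega
      have : (l.take j)[i] = c := by rw [List.getElem_take]; exact g1
      exact this ▸ List.getElem_mem hlt
    have ht : 1 ≤ (l.take j).count c := List.count_pos_iff.mpr hmem
    have hdc : 1 ≤ (l.drop j).count c := by
      rw [hd, g2]; simp
    calc 2 ≤ (l.take j).count c + (l.drop j).count c := by omega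
      _ = l.count c := by rw [← List.count_append, ← hsplit]
  rcases Nat.lt_or_ge k m with h | h
  · exact key k m hk hm h h1 h2
  · exact key m k hm hk (by omega) h2 h1

theorem encodeBy_front (pre : List Char) (x : Char) :
    encodeBy ((pre ++ [x]).map PySem.Chars.lowerChar) (pre ++ [x])
      = encodeBy ((pre ++ [x]).map PySem.Chars.lowerChar) pre
        ++ [if 2 ≤ ((pre ++ [x]).map PySem.Chars.lowerChar).count (PySem.Chars.lowerChar x)
            then ')' else '('] := by
  simp [encodeBy]

theorem encodeBy_ctx_append_of_not_mem (P pre : List Char) (c : Char)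
    (h : ∀ ch ∈ pre, PySem.Chars.lowerChar ch ≠ c) :
    encodeBy (P ++ [c]) pre = encodeBy P pre := by
  apply List.map_congr_left
  intro a ha
  simp [List.count_append, Ne.symm (h a ha)]

theorem encodeBy_ctx_append_of_dup (P pre : List Char) (c : Char) (h2 : 2 ≤ P.count c) :
    encodeBy (P ++ [c]) pre = encodeBy P pre := by
  apply List.map_congr_left
  intro a _
  by_cases hc : PySem.Chars.lowerChar a = c
  · have hL : 2 ≤ (P ++ [c]).count (PySem.Chars.lowerChar a) := by
      rw [hc, List.count_append]
      have h3 : List.count c [c] = 1 := by simp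
      omega
    rw [if_pos hL, if_pos (hc ▸ h2)]
  · have he : (P ++ [c]).count (PySem.Chars.lowerChar a) = P.count (PySem.Chars.lowerChar a) := by
      simp [List.count_append, Ne.symm hc]
    rw [he]

theorem encodeBy_ctx_append_of_once (pre : List Char) (c : Char) (k : Nat)
    (hidx : PySem.List.index? (pre.map PySem.Chars.lowerChar) c = some k)
    (h1 : (pre.map PySem.Chars.lowerChar).count c = 1) :
    encodeBy (pre.map PySem.Chars.lowerChar ++ [c]) pre
      = (encodeBy (pre.map PySem.Chars.lowerChar) pre).set k ')' := by
  obtain ⟨hk, hkc, _⟩ := PySem.List.getElem_of_index?_eq_some hidx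
  have hkp : k < pre.length := by simpa using hk
  apply List.ext_getElem
  · simp [encodeBy]
  · intro m hm1 hm2
    have hmp : m < pre.length := by simpa [encodeBy] using hm1
    rw [List.getElem_set]
    simp only [encodeBy, List.getElem_map]
    have hPm : (pre.map PySem.Chars.lowerChar)[m]'(by simpa using hmp)
        = PySem.Chars.lowerChar pre[m] := List.getElem_map _
    by_cases hc : PySem.Chars.lowerChar pre[m] = c
    · have hmk : k = m := by
        by_contra hne
        have := two_le_count_of_two_getElem (pre.map PySem.Chars.lowerChar) c k m hk
          (by simpa using hmp) hne hkc (by rw [hPm, hc])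
        omega
      have hcond : 2 ≤ (pre.map PySem.Chars.lowerChar ++ [c]).count (PySem.Chars.lowerChar pre[m]) := by
        rw [hc, List.count_append, h1]
        have h3 : List.count c [c] = 1 := by simp
        omega
      rw [if_pos hcond, if_pos hmk]
    · have hne : k ≠ m := by
        intro he
        subst he
        exact hc (by rw [← hPm]; exact hkc)
      have hcnt : (pre.map PySem.Chars.lowerChar ++ [c]).count (PySem.Chars.lowerChar pre[m])
          = (pre.map PySem.Chars.lowerChar).count (PySem.Chars.lowerChar pre[m]) := by
        simp [List.count_append, Ne.symm hc]
      rw [hcnt, if_neg hne]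

theorem dictSpec_append_of_ne (pre : List Char) (x : Char) (c' : Char)
    (h : c' ≠ PySem.Chars.lowerChar x) :
    dictSpec (pre ++ [x]) c' = dictSpec pre c' := by
  unfold dictSpec
  rw [List.map_append, List.map_singleton]
  have hcnt : (pre.map PySem.Chars.lowerChar ++ [PySem.Chars.lowerChar x]).count c'
      = (pre.map PySem.Chars.lowerChar).count c' := by
    simp [List.count_append, Ne.symm h]
  by_cases hmem : c' ∈ pre.map PySem.Chars.lowerChar
  · rw [PySem.List.index?_append_of_mem _ hmem, hcnt]
  · have e1 : PySem.List.index? (pre.map PySem.Chars.lowerChar) c' = none := by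
      rw [PySem.List.index?_eq_idxOf?]; exact List.idxOf?_eq_none_iff.mpr hmem
    have e2 : PySem.List.index? (pre.map PySem.Chars.lowerChar ++ [PySem.Chars.lowerChar x]) c' = none := by
      rw [PySem.List.index?_eq_idxOf?]
      exact List.idxOf?_eq_none_iff.mpr (by simp [hmem, h])
    rw [e1, e2]

theorem step_spec (pre : List Char) (x : Char) (d : PySem.Dict Char Int)
    (hd : ∀ c, d.get? c = dictSpec pre c) :
    ∃ d' : PySem.Dict Char Int,
      dupB_step (encodeBy (pre.map PySem.Chars.lowerChar) pre, d) ((pre.length : Int), x)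
        = (encodeBy ((pre ++ [x]).map PySem.Chars.lowerChar) (pre ++ [x]), d')
      ∧ ∀ c, d'.get? c = dictSpec (pre ++ [x]) c := by
  have hx := hd (PySem.Chars.lowerChar x)
  rw [dictSpec] at hx
  have hmape : (pre ++ [x]).map PySem.Chars.lowerChar
      = pre.map PySem.Chars.lowerChar ++ [PySem.Chars.lowerChar x] := by simp
  have h3 : List.count (PySem.Chars.lowerChar x) [PySem.Chars.lowerChar x] = 1 := by simp
  cases hidx : PySem.List.index? (pre.map PySem.Chars.lowerChar) (PySem.Chars.lowerChar x) with
  | none =>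
    rw [hidx] at hx
    dsimp only at hx
    have hnm : PySem.Chars.lowerChar x ∉ pre.map PySem.Chars.lowerChar := by
      rw [PySem.List.index?_eq_idxOf?] at hidx
      exact List.idxOf?_eq_none_iff.mp hidx
    have hcnt0 : (pre.map PySem.Chars.lowerChar).count (PySem.Chars.lowerChar x) = 0 :=
      List.count_eq_zero.mpr hnm
    have hlast : ¬ 2 ≤ (pre.map PySem.Chars.lowerChar ++ [PySem.Chars.lowerChar x]).count
        (PySem.Chars.lowerChar x) := by
      rw [List.count_append, hcnt0]; omega
    refine ⟨d.insert (PySem.Chars.lowerChar x) ((pre.length : Int)), ?_, ?_⟩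
    · simp only [dupB_step, hx]
      refine Prod.ext ?_ rfl
      rw [encodeBy_front, hmape, if_neg hlast,
        encodeBy_ctx_append_of_not_mem _ _ _
          (fun ch hch heq => hnm (by rw [← heq]; exact List.mem_map_of_mem hch))]
    · intro c'
      by_cases hcc : c' = PySem.Chars.lowerChar x
      · subst hcc
        rw [PySem.Dict.get?_insert_self]
        unfold dictSpec
        rw [hmape, PySem.List.index?_append_singleton_self _ _ hnm]
        dsimp only
        rw [if_neg hlast]
        simp
      · rw [PySem.Dict.get?_insert_of_ne _ _ hcc, hd c', dictSpec_append_of_ne _ _ _ hcc]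
  | some k =>
    rw [hidx] at hx
    dsimp only at hx
    have hmem : PySem.Chars.lowerChar x ∈ pre.map PySem.Chars.lowerChar :=
      (PySem.List.index?_isSome_iff _ _).mp (by rw [hidx]; rfl)
    have hge1 : 1 ≤ (pre.map PySem.Chars.lowerChar).count (PySem.Chars.lowerChar x) :=
      List.count_pos_iff.mpr hmem
    have hidx2 : PySem.List.index?
        (pre.map PySem.Chars.lowerChar ++ [PySem.Chars.lowerChar x]) (PySem.Chars.lowerChar x)
        = some k := by
      rw [PySem.List.index?_append_of_mem _ hmem, hidx]
    by_cases hdup : 2 ≤ (pre.map PySem.Chars.lowerChar).count (PySem.Chars.lowerChar x)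
    · rw [if_pos hdup] at hx
      have hlast : 2 ≤ (pre.map PySem.Chars.lowerChar ++ [PySem.Chars.lowerChar x]).count
          (PySem.Chars.lowerChar x) := by
        rw [List.count_append]; omega
      refine ⟨d, ?_, ?_⟩
      · simp only [dupB_step, hx]
        rw [if_neg (by decide)]
        refine Prod.ext ?_ rfl
        rw [encodeBy_front, hmape, if_pos hlast, encodeBy_ctx_append_of_dup _ _ _ hdup]
      · intro c'
        by_cases hcc : c' = PySem.Chars.lowerChar x
        · subst hcc
          rw [hd]
          unfold dictSpec
          rw [hmape, hidx, hidx2]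
          dsimp only
          rw [if_pos hdup, if_pos hlast]
        · rw [hd c', dictSpec_append_of_ne _ _ _ hcc]
    · rw [if_neg hdup] at hx
      have hone : (pre.map PySem.Chars.lowerChar).count (PySem.Chars.lowerChar x) = 1 := by omega
      have hlast : 2 ≤ (pre.map PySem.Chars.lowerChar ++ [PySem.Chars.lowerChar x]).count
          (PySem.Chars.lowerChar x) := by
        rw [List.count_append, hone, h3]
      refine ⟨d.insert (PySem.Chars.lowerChar x) (-1), ?_, ?_⟩
      · simp only [dupB_step, hx]
        rw [if_pos (show ((k : Nat) : Int) ≥ 0 from Int.natCast_nonneg k)]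
        refine Prod.ext ?_ rfl
        rw [encodeBy_front, hmape, if_pos hlast,
          show ((k : Nat) : Int).toNat = k from Int.toNat_natCast k,
          encodeBy_ctx_append_of_once pre _ k hidx hone]
      · intro c'
        by_cases hcc : c' = PySem.Chars.lowerChar x
        · subst hcc
          rw [PySem.Dict.get?_insert_self]
          unfold dictSpec
          rw [hmape, hidx2]
          dsimp only
          rw [if_pos hlast]
        · rw [PySem.Dict.get?_insert_of_ne _ _ hcc, hd c', dictSpec_append_of_ne _ _ _ hcc]

theorem fold_inv : ∀ (suf pre : List Char) (d : PySem.Dict Char Int),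
    (∀ c, d.get? c = dictSpec pre c) →
    (((PySem.List.enumerate suf (pre.length : Int)).foldl dupB_step
        (encodeBy (pre.map PySem.Chars.lowerChar) pre, d)).1
      = encodeBy ((pre ++ suf).map PySem.Chars.lowerChar) (pre ++ suf)) := by
  intro suf
  induction suf with
  | nil => intro pre d _; simp [PySem.List.enumerate_nil]
  | cons x t ih =>
    intro pre d hd
    rw [PySem.List.enumerate_cons, List.foldl_cons]
    obtain ⟨d', hstep, hd'⟩ := step_spec pre x d hd
    rw [hstep]
    have hlen : (pre.length : Int) + 1 = ((pre ++ [x]).length : Int) := by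
      simp
    rw [hlen]
    have := ih (pre ++ [x]) d' hd'
    simpa using this

-- counting a single-character substring is counting the character
theorem count_go_singleton (c : Char) (s : List Char) : ∀ (fuel acc : Nat), s.length ≤ fuel →
    PySem.Chars.count.go [c] fuel s acc = acc + s.count c := by
  induction s with
  | nil => intro fuel acc h; cases fuel <;> simp [PySem.Chars.count.go]
  | cons a t ih =>
    intro fuel acc h
    cases fuel with
    | zero => simp at h
    | succ f =>
      simp only [PySem.Chars.count.go]
      by_cases hc : a = c
      · subst hc
        simp [List.isPrefixOf, ih f (acc + 1) (by simpa using h)]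
        omega
      · simp [List.isPrefixOf, hc, Ne.symm hc, ih f acc (by simpa using h)]

theorem count_singleton (s : List Char) (c : Char) :
    PySem.Chars.count s [c] = s.count c := by
  simp [PySem.Chars.count]
  simpa using count_go_singleton c s s.length 0 le_rfl

-- A's accumulator loop, written out
theorem foldl_A (p : Char → Prop) [DecidablePred p] (l : List Char) (a : String) :
    (l.foldl (fun w c => if p c then w ++ ")" else w ++ "(") a).toList
      = a.toList ++ l.map (fun c => if p c then ')' else '(') := by
  induction l generalizing a with
  | nil => simp
  | cons c t ih =>
    by_cases hp : p c <;> simp [hp, ih, String.toList_append]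

theorem duplicate_encode1_spec_aux (word : String) :
    duplicate_encode1 word = duplicate_encode1_alt word := by
  apply String.toList_inj.mp
  unfold duplicate_encode1 duplicate_encode1_alt
  rw [foldl_A (fun char =>
        PySem.Str.count (PySem.Str.lower word) (PySem.Str.lower (String.ofList [char])) > 1)]
  have hB := fold_inv word.toList [] PySem.Dict.empty
      (by intro c; simp [dictSpec, PySem.List.index?])
  simp only [List.length_nil, Int.ofNat_zero, List.nil_append, List.map_nil] at hB
  rw [show encodeBy [] [] = ([] : List Char) from rfl] at hB
  rw [String.toList_ofList, hB, String.toList_ofList]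
  simp only [encodeBy]
  apply List.map_congr_left
  intro c _
  have h1 : PySem.Str.count (PySem.Str.lower word) (PySem.Str.lower (String.ofList [c]))
      = (word.toList.map PySem.Chars.lowerChar).count (PySem.Chars.lowerChar c) := by
    simp [PySem.Str.count_eq, PySem.Str.toList_lower, PySem.Chars.lower, count_singleton]
  rw [h1]
  by_cases h : 2 ≤ (word.toList.map PySem.Chars.lowerChar).count (PySem.Chars.lowerChar c)
  · rw [if_pos (by omega), if_pos h]
  · rw [if_neg (by omega), if_neg h]

-- ===== VERDICT (by name: the statement is the Claim_ definition above) =====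
theorem duplicate_encode1_spec : Claim_equal_duplicate_encode1 := by
  intro word _
  exact duplicate_encode1_spec_aux word
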